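-- pv_equiv track=rewrite | github.com/datanger/neo4j-graphrag-python | neo4j_graphrag/experimental/components/code_extractor/matlab/post_processor.py | _remove_strings
-- ===== SOURCE A (Python) =====
-- def _remove_strings(line: str) -> str:
--     """移除行中的字符串内容"""
--     result = ""
--     i = 0
--     in_single_quote = False
--     in_double_quote = False
--
--     while i < len(line):
--         char = line[i]
--
--         if char == "'" and not in_double_quote:
--             in_single_quote = not in_single_quote
--             result += " "  # 用空格替换字符串内容
--         elif char == '"' and not in_single_quote:
--             in_double_quote = not in_double_quote
--             result += " "  # 用空格替换字符串内容
--         elif not in_single_quote and not in_double_quote: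
--             result += char
--
--         i += 1
--
--     return result
-- ===== SOURCE B (Python) =====
-- def _remove_strings(line: str) -> str:
--     """移除行中的字符串内容"""
--     result = []
--     i = 0
--     n = len(line)
--     while i < n:
--         ch = line[i]
--         if ch == "'" or ch == '"':
--             result.append(" ")
--             j = line.find(ch, i + 1)
--             if j == -1:
--                 break
--             result.append(" ")
--             i = j + 1
--         else:
--             result.append(ch)
--             i += 1
--     return "".join(result)
-- ===== Notes on version B (the rewrite author's own statement) =====
-- stated objective: faster
-- what changed: Replaces A's per-character two-flag (in_single/in_double) state machine built by repeated string concatenation with a scan that, at each opening quote, jumps directly past the matching closing delimiter via str.find, collecting pieces in a list joined once.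
import Mathlib
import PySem

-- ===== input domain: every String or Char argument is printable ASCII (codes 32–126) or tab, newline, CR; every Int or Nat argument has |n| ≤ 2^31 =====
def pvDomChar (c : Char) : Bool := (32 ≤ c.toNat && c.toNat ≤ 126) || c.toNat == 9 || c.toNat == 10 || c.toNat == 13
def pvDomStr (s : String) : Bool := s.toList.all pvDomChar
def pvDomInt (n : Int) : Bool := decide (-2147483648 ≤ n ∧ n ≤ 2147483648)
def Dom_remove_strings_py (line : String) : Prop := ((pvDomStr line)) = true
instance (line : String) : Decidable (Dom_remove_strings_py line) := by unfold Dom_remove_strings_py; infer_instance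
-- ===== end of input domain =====

-- B replaces A's per-character quote-state machine by a scan that jumps over each
-- string body with a single find of the matching delimiter (objective: alternative).

-- ===== PORT A =====
-- A's while-loop over line[i], carrying in_single_quote / in_double_quote.
def removeStringsA : List Char → Bool → Bool → List Char
  | [], _, _ => []
  | c :: cs, s, d =>
    if c = '\'' ∧ ¬ (d = true) then ' ' :: removeStringsA cs (!s) d
    else if c = '"' ∧ ¬ (s = true) then ' ' :: removeStringsA cs s (!d)
    else if ¬ (s = true) ∧ ¬ (d = true) then c :: removeStringsA cs s d
    else removeStringsA cs s d

def remove_strings_py (line : String) : String :=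
  String.mk (removeStringsA line.toList false false)

-- ===== PORT B =====
-- B's loop: copy chars until a quote; emit a space, find the matching close
-- (dropWhile = line.find(ch, i+1)); if found emit a second space and continue after it.
def removeStringsB : List Char → List Char
  | [] => []
  | c :: cs =>
    if c = '\'' ∨ c = '"' then
      match hfind : cs.dropWhile (· ≠ c) with
      | [] => [' ']                       -- find returned -1: break
      | _ :: rest => ' ' :: ' ' :: removeStringsB rest
    else c :: removeStringsB cs
termination_by cs => cs.length
decreasing_by
  · have h := List.length_dropWhile_le (· ≠ c) cs
    rw [hfind] at h; simp at h ⊢; omega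
  · simp

def remove_strings_py_alt (line : String) : String :=
  String.mk (removeStringsB line.toList)

-- ===== PRECONDITION & SPEC =====
def Spec_remove_strings_py (line : String) (out : String) : Prop := out = remove_strings_py_alt line
instance (line : String) (out : String) : Decidable (Spec_remove_strings_py line out) := by unfold Spec_remove_strings_py; infer_instance

-- ===== CLAIM (what is proved, stated in full; the proofs are below) =====
def Claim_equal_remove_strings_py : Prop := ∀ (line : String), Dom_remove_strings_py line → Spec_remove_strings_py line (remove_strings_py line)

-- ===== LEMMAS AND PROOFS =====

-- inside a single-quoted string, A emits nothing until the closing ' (if any)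
theorem removeStringsA_single (cs : List Char) :
    removeStringsA cs true false =
      match cs.dropWhile (fun x => !decide (x = '\'')) with
      | [] => []
      | _ :: rest => ' ' :: removeStringsA rest false false := by
  induction cs with
  | nil => simp [removeStringsA]
  | cons c cs ih =>
    by_cases h : c = '\''
    · subst h; simp [removeStringsA, List.dropWhile]
    · simp [removeStringsA, h, List.dropWhile, ih]

-- inside a double-quoted string, A emits nothing until the closing " (if any)
theorem removeStringsA_double (cs : List Char) :
    removeStringsA cs false true =
      match cs.dropWhile (fun x => !decide (x = '"')) with
      | [] => []
      | _ :: rest => ' ' :: removeStringsA rest false false := by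
  induction cs with
  | nil => simp [removeStringsA]
  | cons c cs ih =>
    by_cases h : c = '"'
    · subst h; simp [removeStringsA, List.dropWhile]
    · simp [removeStringsA, h, List.dropWhile, ih]

theorem removeStringsA_eq_B (cs : List Char) :
    removeStringsA cs false false = removeStringsB cs := by
  induction cs using removeStringsB.induct with
  | case1 => simp [removeStringsA, removeStringsB]
  | case2 c cs hq heq =>
    rcases hq with h | h
    all_goals subst h
    all_goals simp only [ne_eq, decide_not] at heq
    all_goals rw [removeStringsB]
    all_goals simp [removeStringsA, removeStringsA_single, removeStringsA_double, heq]
    all_goals split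
    all_goals rename_i hfind
    all_goals try simp only [ne_eq, decide_not] at hfind
    all_goals try rw [heq] at hfind
    all_goals simp_all [decide_not, ne_eq]
  | case3 c cs hq x rest heq ih =>
    rcases hq with h | h
    all_goals subst h
    all_goals simp only [ne_eq, decide_not] at heq
    all_goals rw [removeStringsB]
    all_goals simp [removeStringsA, removeStringsA_single, removeStringsA_double, heq, ih]
    all_goals split
    all_goals rename_i hfind
    all_goals try simp only [ne_eq, decide_not] at hfind
    all_goals try rw [heq] at hfind
    all_goals simp_all [decide_not, ne_eq]
  | case4 c cs hq ih =>
    have h1 : ¬ c = '\'' := fun h => hq (Or.inl h)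
    have h2 : ¬ c = '"' := fun h => hq (Or.inr h)
    rw [removeStringsB]
    simp [removeStringsA, h1, h2, hq, ih]

-- ===== VERDICT (by name: the statement is the Claim_ definition above) =====
theorem remove_strings_py_spec : Claim_equal_remove_strings_py := by
  intro line _
  unfold Spec_remove_strings_py remove_strings_py remove_strings_py_alt
  rw [removeStringsA_eq_B]
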